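-- pv_equiv track=rewrite | github.com/Harrix/harrix-pylib | src/harrix_pylib/markdown_checker.py | _is_table_cell_only_dash
-- ===== SOURCE A (Python) =====
-- def _is_table_cell_only_dash(line: str, pos: int) -> bool:
--     """Return True if position pos in line is inside a table cell that contains only a hyphen."""
--     parts = line.split("|")
--     min_count_parts = 2
--     if len(parts) < min_count_parts:
--         return False
--     start = 0
--     for part in parts:
--         end = start + len(part)
--         if start <= pos < end:
--             return part.strip() == "-"
--         start = end + 1  # +1 for the | separator
--     return False
-- ===== SOURCE B (Python) =====
-- def _is_table_cell_only_dash(line: str, pos: int) -> bool: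
--     """Return True if position pos in line is inside a table cell that contains only a hyphen."""
--     if "|" not in line or pos < 0 or pos >= len(line) or line[pos] == "|":
--         return False
--     left = line.rfind("|", 0, pos)
--     right = line.find("|", pos)
--     if right == -1:
--         right = len(line)
--     return line[left + 1:right].strip() == "-"
-- ===== Notes on version B (the rewrite author's own statement) =====
-- stated objective: alternative
-- what changed: Instead of splitting the whole line on '|' and scanning the parts with a running start offset, B locates the enclosing cell directly with two boundary searches (rfind and find around pos) and strips that one slice.
import Mathlib
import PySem

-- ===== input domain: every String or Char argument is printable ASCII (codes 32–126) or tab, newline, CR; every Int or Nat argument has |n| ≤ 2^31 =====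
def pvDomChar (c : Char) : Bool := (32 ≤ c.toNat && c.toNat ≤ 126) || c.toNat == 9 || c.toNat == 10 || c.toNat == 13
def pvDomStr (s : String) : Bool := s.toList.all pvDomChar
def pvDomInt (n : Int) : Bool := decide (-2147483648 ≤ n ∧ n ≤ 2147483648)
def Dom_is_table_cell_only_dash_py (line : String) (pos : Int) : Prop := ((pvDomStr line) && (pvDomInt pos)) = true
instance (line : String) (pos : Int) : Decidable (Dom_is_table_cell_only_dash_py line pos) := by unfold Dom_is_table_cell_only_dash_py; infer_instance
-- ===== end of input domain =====

-- B replaces A's split-the-whole-line-and-scan-the-parts loop by two direct boundary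
-- searches (rfind/find) around pos; objective: alternative decomposition, no loop over parts.

-- ===== PORT A =====
-- the 'for part in parts' loop of A, with its running 'start' offset
def pvDashLoop : List String → Int → Int → Bool
  | [], _, _ => false
  | part :: rest, start, pos =>
    let e := start + PySem.Str.len part
    if start ≤ pos ∧ pos < e then PySem.Str.strip part == "-"
    else pvDashLoop rest (e + 1) pos

def is_table_cell_only_dash_py (line : String) (pos : Int) : Bool :=
  match PySem.Str.split? line "|" with
  | none => false  -- unreachable totality guard: the separator "|" is nonempty
  | some parts =>
    let min_count_parts : Int := 2
    if (parts.length : Int) < min_count_parts then false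
    else pvDashLoop parts 0 pos

-- ===== PORT B =====
def is_table_cell_only_dash_py_alt (line : String) (pos : Int) : Bool :=
  if !PySem.Str.isIn "|" line || pos < 0 || PySem.Str.len line ≤ pos
      || (PySem.Str.pyGet? line pos == some '|') then false
  else
    let left := PySem.Str.rfindFrom line "|" 0 (some pos)
    let r := PySem.Str.findFrom line "|" pos
    let right := if r = -1 then PySem.Str.len line else r
    PySem.Str.strip (PySem.Str.slice line (some (left + 1)) (some right)) == "-"

-- ===== PRECONDITION & SPEC =====
def Spec_is_table_cell_only_dash_py (line : String) (pos : Int) (out : Bool) : Prop := out = is_table_cell_only_dash_py_alt line pos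
instance (line : String) (pos : Int) (out : Bool) : Decidable (Spec_is_table_cell_only_dash_py line pos out) := by unfold Spec_is_table_cell_only_dash_py; infer_instance

-- ===== CLAIM (what is proved, stated in full; the proofs are below) =====
def Claim_equal_is_table_cell_only_dash_py : Prop := ∀ (line : String) (pos : Int), Dom_is_table_cell_only_dash_py line pos → Spec_is_table_cell_only_dash_py line pos (is_table_cell_only_dash_py line pos)

-- ===== LEMMAS AND PROOFS =====

-- list-level model of A's loop over the split parts, pos normalised to the part start
def pvLoop0 : List (List Char) → Int → Bool
  | [], _ => false
  | part :: rest, q =>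
    if 0 ≤ q ∧ q < (part.length : Int) then PySem.Chars.strip part == ['-']
    else pvLoop0 rest (q - part.length - 1)

-- structural model of line.split("|")
def pvMsplit (cur : List Char) : List Char → List (List Char)
  | [] => [cur]
  | c :: rest => if c = '|' then cur :: pvMsplit [] rest else pvMsplit (cur ++ [c]) rest

-- list-level model of B past its '"|" in line' guard
def pvG (cs : List Char) (q : Int) : Bool :=
  if ¬ (0 ≤ q ∧ q < (cs.length : Int)) then false
  else if PySem.Chars.pyGet? cs q == some '|' then false
  else
    let left := PySem.Chars.rfind (cs.take q.toNat) ['|']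
    let r := PySem.Chars.find (cs.drop q.toNat) ['|']
    let right := if r = -1 then (cs.length : Int) else q + r
    PySem.Chars.strip (PySem.List.slice cs (some (left + 1)) (some right)) == ['-']

def pvTotal : List (List Char) → Int
  | [] => 0
  | part :: rest => part.length + 1 + pvTotal rest

lemma pvStrBeq (s t : String) : (s == t) = (s.toList == t.toList) := by
  by_cases hst : s = t
  · subst hst; simp
  · rw [beq_eq_false_iff_ne.mpr hst,
      beq_eq_false_iff_ne.mpr (fun h => hst (String.toList_inj.mp h))]

lemma pvInfixSingleton (c : Char) (l : List Char) : ([c] <:+: l) ↔ c ∈ l := by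
  constructor
  · intro h; exact h.mem (List.mem_singleton_self c)
  · intro h
    obtain ⟨a, b, rfl⟩ := List.append_of_mem h
    exact ⟨a, b, by simp⟩

lemma pvPrefixSingleton {c : Char} {l : List Char} (h : [c].isPrefixOf l = true) : c ∈ l := by
  cases l with
  | nil => simp [List.isPrefixOf] at h
  | cons x xs =>
    simp [List.isPrefixOf] at h
    simp [h]

-- ---- find / rfind characterisations for a single-character needle ----
lemma pvFindGo_none {c : Char} {l : List Char} (h : c ∉ l) : ∀ k, PySem.Chars.find.go [c] l k = -1 := by
  induction l with
  | nil => intro k; simp [PySem.Chars.find.go]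
  | cons x xs ih =>
    intro k
    have hx : ([x] = [x]) := rfl
    rw [PySem.Chars.find.go]
    have hpre : [c].isPrefixOf (x :: xs) = false := by
      by_contra hc
      exact h (pvPrefixSingleton (by revert hc; cases ([c].isPrefixOf (x :: xs)) <;> simp))
    rw [hpre]
    simp only [if_neg Bool.false_ne_true]
    exact ih (fun hm => h (List.mem_cons_of_mem _ hm)) (k+1)

lemma pvFind_none {c : Char} {l : List Char} (h : c ∉ l) : PySem.Chars.find l [c] = -1 := by
  unfold PySem.Chars.find; exact pvFindGo_none h 0

lemma pvFindGo_append {c : Char} {a : List Char} (b : List Char) (h : c ∉ a) :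
    ∀ k : Nat, PySem.Chars.find.go [c] (a ++ c :: b) k = k + a.length := by
  induction a generalizing b with
  | nil =>
    intro k
    rw [List.nil_append, PySem.Chars.find.go]
    simp [List.isPrefixOf]
  | cons x xs ih =>
    intro k
    have hx : ¬ (c = x) := fun hc => h (by simp [hc])
    rw [List.cons_append, PySem.Chars.find.go]
    have hpre : [c].isPrefixOf (x :: (xs ++ c :: b)) = false := by
      simp [List.isPrefixOf, hx]
    rw [hpre]
    simp only [Bool.false_eq_true, if_false]
    rw [ih b (fun hm => h (List.mem_cons_of_mem _ hm)) (k + 1)]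
    simp only [List.length_cons]
    omega

lemma pvFind_append {c : Char} {a : List Char} (b : List Char) (h : c ∉ a) :
    PySem.Chars.find (a ++ c :: b) [c] = a.length := by
  unfold PySem.Chars.find
  rw [pvFindGo_append b h 0]
  simp

lemma pvRfindGo_ge (s sub : List Char) : ∀ j, -1 ≤ PySem.Chars.rfind.go s sub j := by
  intro j
  induction j with
  | zero =>
    rw [PySem.Chars.rfind.go]
    split
    · omega
    · omega
  | succ n ih =>
    rw [PySem.Chars.rfind.go]
    split
    · omega
    · exact ih

lemma pvRfind_ge (s sub : List Char) : -1 ≤ PySem.Chars.rfind s sub := by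
  unfold PySem.Chars.rfind; exact pvRfindGo_ge s sub s.length

lemma pvRfindGo_none {c : Char} {s : List Char} (h : c ∉ s) : ∀ j, PySem.Chars.rfind.go s [c] j = -1 := by
  have hpre : ∀ m : Nat, [c].isPrefixOf (s.drop m) = false := by
    intro m
    by_contra hc
    have : [c].isPrefixOf (s.drop m) = true := by revert hc; cases ([c].isPrefixOf (s.drop m)) <;> simp
    exact h (List.drop_subset m s (pvPrefixSingleton this))
  intro j
  induction j with
  | zero =>
    rw [PySem.Chars.rfind.go]
    have := hpre 0
    simp only [List.drop_zero] at this
    simp [this]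
  | succ n ih =>
    rw [PySem.Chars.rfind.go]
    rw [hpre (n + 1)]
    simp only [if_neg Bool.false_ne_true]
    exact ih

lemma pvRfind_none {c : Char} {s : List Char} (h : c ∉ s) : PySem.Chars.rfind s [c] = -1 := by
  unfold PySem.Chars.rfind; exact pvRfindGo_none h s.length

lemma pvRfindGo_shift (c : Char) (a t : List Char) :
    ∀ k : Nat, PySem.Chars.rfind.go (a ++ c :: t) [c] (a.length + 1 + k) =
      if PySem.Chars.rfind.go t [c] k = -1 then PySem.Chars.rfind.go (a ++ c :: t) [c] a.length
      else (a.length : Int) + 1 + PySem.Chars.rfind.go t [c] k := by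
  have hdrop : ∀ m : Nat, (a ++ c :: t).drop (a.length + 1 + m) = t.drop m := by
    intro m
    rw [show a.length + 1 + m = a.length + (1 + m) from by omega]
    rw [List.drop_append]
    rw [List.drop_eq_nil_of_le (by omega), List.nil_append,
      show a.length + (1 + m) - a.length = m + 1 from by omega, List.drop_succ_cons]
  intro k
  induction k with
  | zero =>
    conv_lhs => rw [show a.length + 1 + 0 = (a.length + 0) + 1 from by omega, PySem.Chars.rfind.go]
    conv_rhs => rw [PySem.Chars.rfind.go]
    rw [show a.length + 0 + 1 = a.length + 1 + 0 from by omega, hdrop 0]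
    simp only [List.drop_zero]
    by_cases hpre : [c].isPrefixOf t = true
    · rw [if_pos hpre, if_pos hpre, if_neg (by omega)]
      push_cast; omega
    · rw [if_neg hpre, if_neg hpre, if_pos rfl]
  | succ n ih =>
    conv_lhs => rw [show a.length + 1 + (n + 1) = (a.length + 1 + n) + 1 from by omega, PySem.Chars.rfind.go]
    conv_rhs => rw [PySem.Chars.rfind.go]
    rw [show a.length + 1 + n + 1 = a.length + 1 + (n + 1) from by omega, hdrop (n + 1)]
    by_cases hpre : [c].isPrefixOf (t.drop (n + 1)) = true
    · rw [if_pos hpre, if_pos hpre, if_neg (by push_cast; omega)]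
      push_cast; omega
    · rw [if_neg hpre, if_neg hpre, ih]

lemma pvRfindGo_at (c : Char) (a t : List Char) :
    PySem.Chars.rfind.go (a ++ c :: t) [c] a.length = a.length := by
  have hdrop : (a ++ c :: t).drop a.length = c :: t := by
    rw [show a.length = a.length + 0 from by omega, List.drop_append]
    simp
  cases ha : a.length with
  | zero =>
    have ha' : a = [] := List.length_eq_zero_iff.mp ha
    subst ha'
    simp only [List.nil_append]
    rw [PySem.Chars.rfind.go]
    simp [List.isPrefixOf]
  | succ m =>
    rw [PySem.Chars.rfind.go]
    rw [ha] at hdrop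
    rw [hdrop]
    simp [List.isPrefixOf]

lemma pvRfind_append (c : Char) (a t : List Char) :
    PySem.Chars.rfind (a ++ c :: t) [c] =
      if PySem.Chars.rfind t [c] = -1 then (a.length : Int)
      else (a.length : Int) + 1 + PySem.Chars.rfind t [c] := by
  unfold PySem.Chars.rfind
  rw [show (a ++ c :: t).length = a.length + 1 + t.length from by simp; omega]
  rw [pvRfindGo_shift, pvRfindGo_at]

lemma pvMsplit_nobar {cs : List Char} (h : '|' ∉ cs) : ∀ cur, pvMsplit cur cs = [cur ++ cs] := by
  induction cs with
  | nil => intro cur; simp [pvMsplit]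
  | cons x xs ih =>
    intro cur
    have hx : ¬ (x = '|') := fun hc => h (by simp [hc])
    rw [pvMsplit, if_neg hx, ih (fun hm => h (List.mem_cons_of_mem _ hm))]
    simp

lemma pvMsplit_bar {a : List Char} (b : List Char) (h : '|' ∉ a) :
    ∀ cur, pvMsplit cur (a ++ '|' :: b) = (cur ++ a) :: pvMsplit [] b := by
  induction a generalizing b with
  | nil => intro cur; simp [pvMsplit]
  | cons x xs ih =>
    intro cur
    have hx : ¬ (x = '|') := fun hc => h (by simp [hc])
    rw [List.cons_append, pvMsplit, if_neg hx, ih b (fun hm => h (List.mem_cons_of_mem _ hm))]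
    simp

lemma pvFirstBar {cs : List Char} (h : '|' ∈ cs) : ∃ a b, cs = a ++ '|' :: b ∧ '|' ∉ a := by
  induction cs with
  | nil => simp at h
  | cons x xs ih =>
    by_cases hx : x = '|'
    · exact ⟨[], xs, by simp [hx], by simp⟩
    · have : '|' ∈ xs := by
        rcases List.mem_cons.mp h with h1 | h1
        · exact absurd h1.symm hx
        · exact h1
      obtain ⟨a, b, hab, hna⟩ := ih this
      exact ⟨x :: a, b, by simp [hab], by simp [hna]; exact fun hc => hx hc.symm⟩

lemma pvMsplit_ne_nil (cur cs : List Char) : pvMsplit cur cs ≠ [] := by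
  induction cs generalizing cur with
  | nil => simp [pvMsplit]
  | cons x xs ih =>
    rw [pvMsplit]
    split
    · simp
    · exact ih _

lemma pvSplitOn_go (fuel : Nat) : ∀ (l cur : List Char) (acc : List (List Char)), l.length ≤ fuel →
    PySem.Chars.splitOn.go ['|'] fuel l cur acc = acc.reverse ++ pvMsplit cur.reverse l := by
  induction fuel with
  | zero =>
    intro l cur acc hl
    have : l = [] := List.length_eq_zero_iff.mp (by omega)
    subst this
    rw [PySem.Chars.splitOn.go]
    simp [pvMsplit]
  | succ n ih =>
    intro l cur acc hl
    cases l with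
    | nil =>
      rw [PySem.Chars.splitOn.go]
      · simp [pvMsplit]
      · omega
    | cons x xs =>
      rw [PySem.Chars.splitOn.go]
      by_cases hx : x = '|'
      · subst hx
        have hpre : ['|'].isPrefixOf ('|' :: xs) = true := by simp [List.isPrefixOf]
        rw [if_pos hpre]
        simp only [List.length_singleton, List.drop_succ_cons, List.drop_zero]
        rw [ih xs [] (cur.reverse :: acc) (by simpa using hl)]
        rw [pvMsplit, if_pos rfl]
        simp
      · have hpre : ['|'].isPrefixOf (x :: xs) = false := by
          simp [List.isPrefixOf]; exact fun hc => hx hc.symm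
        rw [hpre]
        simp only [Bool.false_eq_true, if_false]
        rw [ih xs (x :: cur) acc (by simpa using hl)]
        rw [pvMsplit, if_neg hx]
        simp

lemma pvSplitOn_eq (cs : List Char) : PySem.Chars.splitOn cs ['|'] = pvMsplit [] cs := by
  unfold PySem.Chars.splitOn
  rw [pvSplitOn_go (cs.length + 1) cs [] [] (by omega)]
  simp

-- ---- pvLoop0 facts ----
lemma pvLoop0_neg : ∀ (parts : List (List Char)) (q : Int), q < 0 → pvLoop0 parts q = false := by
  intro parts
  induction parts with
  | nil => intro q hq; rfl
  | cons part rest ih =>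
    intro q hq
    rw [pvLoop0, if_neg (by omega)]
    exact ih _ (by omega)

lemma pvTotal_nonneg : ∀ parts : List (List Char), 0 ≤ pvTotal parts := by
  intro parts
  induction parts with
  | nil => simp [pvTotal]
  | cons part rest ih => rw [pvTotal]; omega

lemma pvLoop0_ge : ∀ (parts : List (List Char)) (q : Int), pvTotal parts ≤ q + 1 → pvLoop0 parts q = false := by
  intro parts
  induction parts with
  | nil => intro q hq; rfl
  | cons part rest ih =>
    intro q hq
    rw [pvTotal] at hq
    have hr := pvTotal_nonneg rest
    rw [pvLoop0, if_neg (by omega)]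
    exact ih _ (by omega)

lemma pvTotal_msplit : ∀ (cs cur : List Char), pvTotal (pvMsplit cur cs) = cur.length + cs.length + 1 := by
  intro cs
  induction cs with
  | nil => intro cur; simp [pvMsplit, pvTotal]
  | cons x xs ih =>
    intro cur
    rw [pvMsplit]
    by_cases hx : x = '|'
    · rw [if_pos hx, pvTotal, ih []]
      simp; omega
    · rw [if_neg hx, ih (cur ++ [x])]
      simp; omega

-- ---- bridges from the ports to the list-level models ----
lemma pvDashLoop_eq : ∀ (parts : List String) (start pos : Int),
    pvDashLoop parts start pos = pvLoop0 (parts.map String.toList) (pos - start) := by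
  intro parts
  induction parts with
  | nil => intro start pos; rfl
  | cons part rest ih =>
    intro start pos
    simp only [pvDashLoop, pvLoop0, List.map_cons, PySem.Str.len_eq]
    by_cases hc : start ≤ pos ∧ pos < start + (part.toList.length : Int)
    · rw [if_pos hc, if_pos (by omega)]
      rw [pvStrBeq]
      simp
    · rw [if_neg hc, if_neg (by omega), ih]
      rw [show pos - (start + (part.toList.length : Int) + 1) = pos - start - part.toList.length - 1 from by omega]

lemma pvBridgeA (line : String) (pos : Int) :
    is_table_cell_only_dash_py line pos =
      if '|' ∈ line.toList then pvLoop0 (pvMsplit [] line.toList) pos else false := by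
  have hsp := PySem.Str.split?_map line "|"
  cases hs : PySem.Str.split? line "|" with
  | none =>
    rw [hs] at hsp
    simp [PySem.Chars.split?] at hsp
  | some parts =>
    rw [hs] at hsp
    simp only [Option.map_some, PySem.Chars.split?, show ("|".toList = ['|']) from by decide] at hsp
    rw [if_neg (by simp)] at hsp
    have hparts : parts.map String.toList = pvMsplit [] line.toList := by
      rw [← pvSplitOn_eq]
      exact Option.some_inj.mp hsp
    have hlen : parts.length = (pvMsplit [] line.toList).length := by
      rw [← hparts, List.length_map]
    have hred : is_table_cell_only_dash_py line pos =
        if (parts.length : Int) < 2 then false else pvDashLoop parts 0 pos := by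
      unfold is_table_cell_only_dash_py
      rw [hs]
    rw [hred]
    by_cases hm : '|' ∈ line.toList
    · obtain ⟨a, b, hab, hna⟩ := pvFirstBar hm
      have h2 : 2 ≤ (pvMsplit [] line.toList).length := by
        rw [hab, pvMsplit_bar b hna []]
        have h0 : 0 < (pvMsplit [] b).length := List.length_pos_of_ne_nil (pvMsplit_ne_nil [] b)
        simp only [List.length_cons]
        omega
      rw [if_neg (by omega), if_pos hm]
      rw [pvDashLoop_eq, hparts, Int.sub_zero]
    · have h1 : pvMsplit [] line.toList = [line.toList] := by
        simpa using pvMsplit_nobar hm []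
      rw [if_pos (by rw [hlen, h1]; norm_num), if_neg hm]

lemma pvRfindFromPrefix (cs : List Char) (p : Int) (h0 : 0 ≤ p) (h1 : p ≤ (cs.length : Int)) :
    PySem.Chars.rfindFrom cs ['|'] 0 (some p) = PySem.Chars.rfind (cs.take p.toNat) ['|'] := by
  simp only [PySem.Chars.rfindFrom]
  rw [if_neg (show ¬ ((cs.length : Int) < p) from by omega),
    if_neg (show ¬ (p < 0) from by omega),
    if_neg (show ¬ ((0:Int) < 0) from by omega),
    if_neg (show ¬ (p < 0) from by omega)]
  simp only [Int.toNat_zero, List.drop_zero]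
  by_cases hr : PySem.Chars.rfind (cs.take p.toNat) ['|'] = -1
  · rw [if_pos hr, hr]
  · rw [if_neg hr]
    omega

lemma pvBridgeB (line : String) (pos : Int) :
    is_table_cell_only_dash_py_alt line pos =
      if '|' ∈ line.toList then pvG line.toList pos else false := by
  have hcs : ("|".toList : List Char) = ['|'] := by decide
  unfold is_table_cell_only_dash_py_alt
  by_cases hm : '|' ∈ line.toList
  · have hIn : PySem.Str.isIn "|" line = true := by
      rw [PySem.Str.isIn_iff_infix, hcs, pvInfixSingleton]
      exact hm
    rw [hIn, if_pos hm]
    unfold pvG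
    by_cases hq : 0 ≤ pos ∧ pos < (line.toList.length : Int)
    · have h1 : ¬ (pos < 0) := by omega
      have h2 : ¬ (PySem.Str.len line ≤ pos) := by rw [PySem.Str.len_eq]; omega
      simp only [h1, h2, Bool.not_true, decide_false, Bool.false_or, Bool.or_false]
      rw [if_neg (not_not_intro hq)]
      have hget : PySem.Str.pyGet? line pos = PySem.Chars.pyGet? line.toList pos :=
        PySem.Str.pyGet?_eq line pos
      rw [hget]
      by_cases hg : PySem.Chars.pyGet? line.toList pos == some '|'
      · rw [if_pos hg, if_pos hg]
      · rw [if_neg hg, if_neg hg]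
        have hrf : PySem.Str.rfindFrom line "|" 0 (some pos) =
            PySem.Chars.rfind (line.toList.take pos.toNat) ['|'] := by
          rw [PySem.Str.rfindFrom_eq, hcs, pvRfindFromPrefix line.toList pos hq.1 (by omega)]
        have hff : PySem.Str.findFrom line "|" pos =
            (if PySem.Chars.find (line.toList.drop pos.toNat) ['|'] = -1 then -1
             else ((pos.toNat : Nat) : Int) + PySem.Chars.find (line.toList.drop pos.toNat) ['|']) := by
          rw [PySem.Str.findFrom_eq, hcs]
          conv_lhs => rw [show pos = ((pos.toNat : Nat) : Int) from by omega]
          exact PySem.Chars.findFrom_natCast line.toList ['|'] pos.toNat (by omega)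
        rw [hrf, hff, pvStrBeq, PySem.Str.toList_strip, PySem.Str.toList_slice,
          PySem.Chars.slice_eq_listSlice, PySem.Str.len_eq]
        by_cases hfind : PySem.Chars.find (line.toList.drop pos.toNat) ['|'] = -1
        · rw [if_pos hfind, if_pos hfind, if_pos rfl]
          simp
        · rw [if_neg hfind, if_neg hfind]
          have hge : 0 ≤ PySem.Chars.find (line.toList.drop pos.toNat) ['|'] := by
            have := PySem.Chars.neg_one_le_find (line.toList.drop pos.toNat) ['|']
            omega
          rw [if_neg (show ¬ ((pos.toNat : Int) + PySem.Chars.find (line.toList.drop pos.toNat) ['|'] = -1) from by omega)]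
          rw [show ((pos.toNat : Int) + PySem.Chars.find (line.toList.drop pos.toNat) ['|']) = pos + PySem.Chars.find (line.toList.drop pos.toNat) ['|'] from by omega]
          simp
    · have hq' : pos < 0 ∨ (line.toList.length : Int) ≤ pos := by omega
      rw [if_pos hq]
      rcases hq' with hlt | hge
      · have h1 : decide (pos < 0) = true := decide_eq_true hlt
        simp only [Bool.not_true, h1, Bool.false_or, Bool.true_or, if_true]
      · have h2 : decide (PySem.Str.len line ≤ pos) = true :=
          decide_eq_true (by rw [PySem.Str.len_eq]; omega)
        simp only [Bool.not_true, h2, Bool.false_or, Bool.or_true, Bool.true_or, if_true]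
  · have hIn : PySem.Str.isIn "|" line = false := by
      rw [← Bool.not_eq_true, PySem.Str.isIn_iff_infix, hcs, pvInfixSingleton]
      exact hm
    rw [hIn, if_neg hm]
    simp

-- ---- the main equivalence on the list level ----
lemma pvDropShift (c : Char) (a b : List Char) (m : Nat) :
    (a ++ c :: b).drop (a.length + 1 + m) = b.drop m := by
  rw [show a.length + 1 + m = a.length + (1 + m) from by omega]
  rw [List.drop_append]
  rw [List.drop_eq_nil_of_le (by omega), List.nil_append,
    show a.length + (1 + m) - a.length = m + 1 from by omega, List.drop_succ_cons]

lemma pvTakeShift (c : Char) (a b : List Char) (m : Nat) :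
    (a ++ c :: b).take (a.length + 1 + m) = a ++ c :: b.take m := by
  rw [show a.length + 1 + m = a.length + (1 + m) from by omega]
  rw [List.take_append]
  rw [List.take_of_length_le (by omega),
    show a.length + (1 + m) - a.length = m + 1 from by omega, List.take_succ_cons]

lemma pvSliceShift (c : Char) (a b : List Char) (m1 m2 : Nat) :
    PySem.List.slice (a ++ c :: b) (some ((a.length : Int) + 1 + (m1 : Int))) (some ((a.length : Int) + 1 + (m2 : Int))) =
      PySem.List.slice b (some (m1 : Int)) (some (m2 : Int)) := by
  rw [show (a.length : Int) + 1 + (m1 : Int) = ((a.length + 1 + m1 : Nat) : Int) from by push_cast; omega,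
    show (a.length : Int) + 1 + (m2 : Int) = ((a.length + 1 + m2 : Nat) : Int) from by push_cast; omega,
    PySem.List.slice_natCast, PySem.List.slice_natCast,
    show a.length + 1 + m2 - (a.length + 1 + m1) = m2 - m1 from by omega,
    pvDropShift]

lemma pvMain : ∀ (n : Nat) (cs : List Char), cs.length ≤ n → ∀ q, pvLoop0 (pvMsplit [] cs) q = pvG cs q := by
  intro n
  induction n with
  | zero =>
    intro cs hcs q
    have hnil : cs = [] := List.length_eq_zero_iff.mp (by omega)
    subst hnil
    rw [show pvMsplit [] ([] : List Char) = [[]] from rfl]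
    rw [pvLoop0, if_neg (by simp), pvLoop0]
    simp only [pvG]
    rw [if_pos (by simp)]
  | succ n ih =>
    intro cs hcs q
    by_cases hm : '|' ∈ cs
    · obtain ⟨a, b, hab, hna⟩ := pvFirstBar hm
      subst hab
      have hlen : (a ++ '|' :: b).length = a.length + 1 + b.length := by simp; omega
      rw [pvMsplit_bar b hna []]
      simp only [List.nil_append]
      by_cases hq0 : q < 0
      · rw [pvLoop0_neg _ q hq0]
        simp only [pvG]
        rw [if_pos (by omega)]
      · by_cases hqn : ((a ++ '|' :: b).length : Int) ≤ q
        · rw [pvLoop0_ge _ q (by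
            rw [pvTotal, pvTotal_msplit b []]
            rw [hlen] at hqn
            simp only [List.length_nil]
            push_cast at hqn ⊢
            omega)]
          simp only [pvG]
          rw [if_pos (by omega)]
        · have hq1 : 0 ≤ q := by omega
          have hq2 : q < ((a ++ '|' :: b).length : Int) := by omega
          have hq2' : q < (a.length : Int) + 1 + (b.length : Int) := by
            rw [hlen] at hq2; push_cast at hq2; omega
          rcases lt_trichotomy q.toNat a.length with hja | hja | hja
          · -- q inside the first part a
            rw [pvLoop0, if_pos (by constructor; omega; omega)]
            simp only [pvG]
            rw [if_neg (not_not_intro ⟨hq1, hq2⟩)]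
            have hget : PySem.Chars.pyGet? (a ++ '|' :: b) q = a[q.toNat]? := by
              rw [PySem.Chars.pyGet?_eq_listPyGet?,
                show q = ((q.toNat : Nat) : Int) from by omega,
                PySem.List.pyGet?_natCast, Int.toNat_natCast, List.getElem?_append, if_pos hja]
            have hnotbar : ¬ ((PySem.Chars.pyGet? (a ++ '|' :: b) q == some '|') = true) := by
              rw [hget, List.getElem?_eq_getElem hja]
              simp only [beq_iff_eq, Option.some.injEq]
              intro hc
              exact hna (hc ▸ List.getElem_mem hja)
            rw [if_neg hnotbar]
            have htake : (a ++ '|' :: b).take q.toNat = a.take q.toNat :=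
              List.take_append_of_le_length (le_of_lt hja)
            have hdrop : (a ++ '|' :: b).drop q.toNat = a.drop q.toNat ++ '|' :: b :=
              List.drop_append_of_le_length (le_of_lt hja)
            have hnb : '|' ∉ a.take q.toNat := fun hc => hna (List.mem_of_mem_take hc)
            have hnd : '|' ∉ a.drop q.toNat := fun hc => hna (List.mem_of_mem_drop hc)
            rw [htake, hdrop, pvRfind_none hnb, pvFind_append b hnd,
              if_neg (show ¬ (((a.drop q.toNat).length : Int) = -1) from by simp),
              show q + ((a.drop q.toNat).length : Int) = (a.length : Int) from by simp; omega,
              show (-1 : Int) + 1 = ((0 : Nat) : Int) from by norm_num,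
              show (a.length : Int) = ((a.length : Nat) : Int) from rfl,
              PySem.List.slice_natCast]
            simp only [Nat.sub_zero, List.drop_zero]
            rw [List.take_append_of_le_length le_rfl, List.take_of_length_le le_rfl]
          · -- q sits exactly on the separator
            rw [pvLoop0, if_neg (by omega)]
            rw [pvLoop0_neg _ _ (by omega)]
            simp only [pvG]
            rw [if_neg (not_not_intro ⟨hq1, hq2⟩)]
            have hget : PySem.Chars.pyGet? (a ++ '|' :: b) q = some '|' := by
              rw [PySem.Chars.pyGet?_eq_listPyGet?,
                show q = ((q.toNat : Nat) : Int) from by omega,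
                PySem.List.pyGet?_natCast, List.getElem?_append, if_neg (by omega),
                show q.toNat - a.length = 0 from by omega]
              rfl
            rw [if_pos (by rw [hget]; simp)]
          · -- q inside the tail b
            have hk : q.toNat = a.length + 1 + (q.toNat - a.length - 1) := by omega
            set k := q.toNat - a.length - 1 with hkdef
            have hkb : k < b.length := by
              rw [hlen] at hq2; omega
            rw [pvLoop0, if_neg (by omega)]
            have hblen : b.length ≤ n := by
              rw [hlen] at hcs; omega
            rw [ih b hblen (q - a.length - 1)]
            -- both sides are pvG; compute them to a common form
            simp only [pvG]
            rw [if_neg (not_not_intro ⟨by omega, by omega⟩),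
              if_neg (not_not_intro ⟨hq1, hq2⟩)]
            have hgetb : PySem.Chars.pyGet? b (q - a.length - 1) = b[k]? := by
              rw [PySem.Chars.pyGet?_eq_listPyGet?,
                show q - a.length - 1 = ((k : Nat) : Int) from by omega,
                PySem.List.pyGet?_natCast]
            have hgetcs : PySem.Chars.pyGet? (a ++ '|' :: b) q = b[k]? := by
              rw [PySem.Chars.pyGet?_eq_listPyGet?,
                show q = ((q.toNat : Nat) : Int) from by omega,
                PySem.List.pyGet?_natCast, List.getElem?_append, if_neg (by omega),
                show q.toNat - a.length = k + 1 from by omega, List.getElem?_cons_succ]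
            rw [hgetb, hgetcs]
            by_cases hgb : (b[k]? == some '|') = true
            · rw [if_pos hgb, if_pos hgb]
            · rw [if_neg hgb, if_neg hgb]
              have htq : q.toNat = a.length + 1 + k := hk
              have htq' : (q - a.length - 1).toNat = k := by omega
              rw [htq, htq', pvTakeShift, pvDropShift, pvRfind_append]
              have hlge := pvRfind_ge (b.take k) ['|']
              have hrge := PySem.Chars.neg_one_le_find (b.drop k) ['|']
              by_cases hlb : PySem.Chars.rfind (b.take k) ['|'] = -1
              · rw [if_pos hlb, hlb]
                by_cases hrr : PySem.Chars.find (b.drop k) ['|'] = -1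
                · rw [if_pos hrr, if_pos hrr, hlen]
                  rw [show (-1 : Int) + 1 = ((0 : Nat) : Int) from by norm_num,
                    show (a.length : Int) + 1 = (a.length : Int) + 1 + ((0 : Nat) : Int) from by norm_num,
                    show ((a.length + 1 + b.length : Nat) : Int) = (a.length : Int) + 1 + ((b.length : Nat) : Int) from by push_cast; omega,
                    pvSliceShift]
                · rw [if_neg hrr, if_neg hrr]
                  rw [show q - (a.length : Int) - 1 + PySem.Chars.find (b.drop k) ['|'] = (((q - a.length - 1 + PySem.Chars.find (b.drop k) ['|']).toNat : Nat) : Int) from by omega,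
                    show (-1 : Int) + 1 = ((0 : Nat) : Int) from by norm_num,
                    show (a.length : Int) + 1 = (a.length : Int) + 1 + ((0 : Nat) : Int) from by norm_num,
                    show q + PySem.Chars.find (b.drop k) ['|'] = (a.length : Int) + 1 + (((q - a.length - 1 + PySem.Chars.find (b.drop k) ['|']).toNat : Nat) : Int) from by omega,
                    pvSliceShift]
              · rw [if_neg hlb]
                rw [show PySem.Chars.rfind (b.take k) ['|'] + 1 = (((PySem.Chars.rfind (b.take k) ['|'] + 1).toNat : Nat) : Int) from by omega,
                  show (a.length : Int) + 1 + PySem.Chars.rfind (b.take k) ['|'] + 1 = (a.length : Int) + 1 + (((PySem.Chars.rfind (b.take k) ['|'] + 1).toNat : Nat) : Int) from by omega]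
                by_cases hrr : PySem.Chars.find (b.drop k) ['|'] = -1
                · rw [if_pos hrr, if_pos hrr, hlen]
                  rw [show ((a.length + 1 + b.length : Nat) : Int) = (a.length : Int) + 1 + ((b.length : Nat) : Int) from by push_cast; omega,
                    pvSliceShift]
                · rw [if_neg hrr, if_neg hrr]
                  rw [show q - (a.length : Int) - 1 + PySem.Chars.find (b.drop k) ['|'] = (((q - a.length - 1 + PySem.Chars.find (b.drop k) ['|']).toNat : Nat) : Int) from by omega,
                    show q + PySem.Chars.find (b.drop k) ['|'] = (a.length : Int) + 1 + (((q - a.length - 1 + PySem.Chars.find (b.drop k) ['|']).toNat : Nat) : Int) from by omega,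
                    pvSliceShift]
    · rw [show pvMsplit [] cs = [[] ++ cs] from pvMsplit_nobar hm [], List.nil_append]
      rw [pvLoop0]
      simp only [pvG]
      by_cases hq : 0 ≤ q ∧ q < (cs.length : Int)
      · rw [if_pos hq, if_neg (not_not_intro hq)]
        have hget : PySem.Chars.pyGet? cs q = cs[q.toNat]? := by
          rw [PySem.Chars.pyGet?_eq_listPyGet?]
          conv_lhs => rw [show q = ((q.toNat : Nat) : Int) from by omega]
          exact PySem.List.pyGet?_natCast cs q.toNat
        have hqlt : q.toNat < cs.length := by omega
        have hnotbar : ¬ ((PySem.Chars.pyGet? cs q == some '|') = true) := by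
          rw [hget, List.getElem?_eq_getElem hqlt]
          simp only [beq_iff_eq, Option.some.injEq]
          intro hc
          exact hm (hc ▸ List.getElem_mem hqlt)
        rw [if_neg hnotbar]
        have hnb : '|' ∉ cs.take q.toNat := fun hc => hm (List.mem_of_mem_take hc)
        have hnd : '|' ∉ cs.drop q.toNat := fun hc => hm (List.mem_of_mem_drop hc)
        rw [pvRfind_none hnb, pvFind_none hnd, if_pos rfl,
          show (-1 : Int) + 1 = ((0 : Nat) : Int) from by norm_num,
          show (cs.length : Int) = ((cs.length : Nat) : Int) from rfl,
          PySem.List.slice_natCast]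
        simp
      · rw [if_neg hq, if_pos hq]
        rfl

-- ===== VERDICT (by name: the statement is the Claim_ definition above) =====
theorem is_table_cell_only_dash_py_spec : Claim_equal_is_table_cell_only_dash_py := by
  intro line pos _
  unfold Spec_is_table_cell_only_dash_py
  rw [pvBridgeA, pvBridgeB, pvMain line.toList.length line.toList le_rfl pos]
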